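-- pv_equiv track=rewrite | github.com/eliottcassidy2000/math | 04-computation/ocf_independence_crossover.py | find_all_directed_cycles
-- ===== SOURCE A (Python) =====
-- def find_all_directed_cycles(A, n, max_len=None):
--     """Find all directed cycles using DFS. Returns list of (length, vertex_set)."""
--     if max_len is None:
--         max_len = n
--     cycles = []
--
--     for start in range(n):
--         # DFS from start, only visiting vertices > start (to avoid double-counting)
--         stack = [(start, [start], {start})]
--         while stack:
--             v, path, visited = stack.pop()
--             for w in range(n):
--                 if not A[v][w]:
--                     continue
--                 if w == start and len(path) >= 3:
--                     # Found a cycle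
--                     cycles.append((len(path), frozenset(path)))
--                 elif w > start and w not in visited and len(path) < max_len:
--                     stack.append((w, path + [w], visited | {w}))
--
--     return cycles
-- ===== SOURCE B (Python) =====
-- def find_all_directed_cycles(A, n, max_len=None):
--     """Find all directed cycles using recursive DFS. Returns list of (length, vertex_set)."""
--     limit = n if max_len is None else max_len
--     cycles = []
--
--     for start in range(n):
--         def dfs(v, path, visited):
--             # closing the cycle back to start (only edge to a vertex <= start that matters)
--             if A[v][start] and len(path) >= 3:
--                 cycles.append((len(path), frozenset(path)))
--             if len(path) < limit:
--                 # descending neighbor order reproduces the LIFO pop order of a stack DFS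
--                 for w in range(n - 1, -1, -1):
--                     if A[v][w] and w > start and w not in visited:
--                         dfs(w, path + [w], visited | {w})
--         dfs(start, [start], {start})
--
--     return cycles
-- ===== Notes on version B (the rewrite author's own statement) =====
-- stated objective: alternative
-- what changed: A's explicit-stack while-loop DFS is replaced by a recursive DFS helper nested in the per-start loop, iterating neighbors in descending order so the emission order matches the LIFO pop order; the (cycles, stack) state machine disappears.
import Mathlib
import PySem

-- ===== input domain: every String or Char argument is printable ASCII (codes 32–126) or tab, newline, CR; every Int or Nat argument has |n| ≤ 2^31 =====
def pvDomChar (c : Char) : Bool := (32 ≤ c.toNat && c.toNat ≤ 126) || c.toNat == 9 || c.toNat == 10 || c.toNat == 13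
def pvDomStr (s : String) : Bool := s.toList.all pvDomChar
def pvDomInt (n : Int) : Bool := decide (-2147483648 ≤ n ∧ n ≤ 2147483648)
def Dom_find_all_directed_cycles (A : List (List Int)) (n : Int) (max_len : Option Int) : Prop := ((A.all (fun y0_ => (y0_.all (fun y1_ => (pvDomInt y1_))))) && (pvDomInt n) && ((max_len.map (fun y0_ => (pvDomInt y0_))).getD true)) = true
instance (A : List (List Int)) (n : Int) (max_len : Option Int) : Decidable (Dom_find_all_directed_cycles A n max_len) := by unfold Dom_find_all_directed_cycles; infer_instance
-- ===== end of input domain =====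

-- B replaces A's explicit-stack DFS by a recursive DFS (children visited in descending
-- order, reproducing the LIFO pop order); same return value, no speed claim.

-- ===== PORT A =====
-- one step of A's inner 'for w in range(n)' scan; state = (cycles so far, stack with head = top)
def pvAScan (A : List (List Int)) (start maxlen : Int) (v : Int) (path : List Int)
    (visited : PySem.Set Int)
    (acc : List (Int × List Int) × List (Int × List Int × PySem.Set Int)) (w : Int) :
    List (Int × List Int) × List (Int × List Int × PySem.Set Int) :=
  if PySem.List.pyGetD (PySem.List.pyGetD A v []) w 0 = 0 then acc
  else if w = start ∧ (3 : Int) ≤ path.length then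
    (acc.1 ++ [((path.length : Int), PySem.Set.ofList path)], acc.2)
  else if start < w ∧ ¬ PySem.Set.contains visited w ∧ (path.length : Int) < maxlen then
    (acc.1, (w, path ++ [w], PySem.Set.union visited [w]) :: acc.2)
  else acc

-- termination measure for A's while-loop (used only by `decreasing_by`)
def pvWeight (maxlen : Int) (b : Nat) (e : Int × List Int × PySem.Set Int) : Nat :=
  b ^ (maxlen + 1 - e.2.1.length).toNat

def pvMeasure (maxlen : Int) (b : Nat) (stack : List (Int × List Int × PySem.Set Int)) : Nat :=
  (stack.map (pvWeight maxlen b)).sum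

lemma pvAScan_snd_shape (A : List (List Int)) (start maxlen : Int) (v : Int) (path : List Int)
    (visited : PySem.Set Int)
    (acc : List (Int × List Int) × List (Int × List Int × PySem.Set Int)) (w : Int) :
    ∃ K, (pvAScan A start maxlen v path visited acc w).2 = K ++ acc.2 ∧ K.length ≤ 1 ∧
      ∀ e ∈ K, e.2.1.length = path.length + 1 ∧ (path.length : Int) < maxlen := by
  unfold pvAScan
  split_ifs with h1 h2 h3
  · exact ⟨[], rfl, by simp, by simp⟩
  · exact ⟨[], rfl, by simp, by simp⟩
  · exact ⟨[(w, path ++ [w], PySem.Set.union visited [w])], rfl, by simp, by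
      intro e he; simp at he; subst he; simpa using h3.2.2⟩
  · exact ⟨[], rfl, by simp, by simp⟩

lemma pvAScan_foldl_shape (A : List (List Int)) (start maxlen : Int) (v : Int) (path : List Int)
    (visited : PySem.Set Int) :
    ∀ (ws : List Int) (acc : List (Int × List Int) × List (Int × List Int × PySem.Set Int)),
    ∃ C, (ws.foldl (pvAScan A start maxlen v path visited) acc).2 = C ++ acc.2 ∧
      C.length ≤ ws.length ∧
      ∀ e ∈ C, e.2.1.length = path.length + 1 ∧ (path.length : Int) < maxlen := by
  intro ws
  induction ws with
  | nil => exact fun acc => ⟨[], rfl, by simp, by simp⟩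
  | cons w ws ih =>
    intro acc
    obtain ⟨K, hK, hK1, hKe⟩ := pvAScan_snd_shape A start maxlen v path visited acc w
    obtain ⟨C, hC, hC1, hCe⟩ := ih (pvAScan A start maxlen v path visited acc w)
    refine ⟨C ++ K, ?_, ?_, ?_⟩
    · simp only [List.foldl_cons] at *
      rw [hC, hK, List.append_assoc]
    · simp only [List.length_append, List.length_cons]; omega
    · intro e he; rcases List.mem_append.mp he with h | h
      exacts [hCe e h, hKe e h]

lemma pvALoop_dec (A : List (List Int)) (n start maxlen : Int) (v : Int) (path : List Int)
    (visited : PySem.Set Int) (rest : List (Int × List Int × PySem.Set Int))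
    (cycles : List (Int × List Int)) :
    pvMeasure maxlen (n.toNat + 2)
        (((PySem.List.pyRange 0 n 1).foldl (pvAScan A start maxlen v path visited)
          (cycles, rest)).2)
      < pvMeasure maxlen (n.toNat + 2) ((v, path, visited) :: rest) := by
  obtain ⟨C, hC, hC1, hCe⟩ :=
    pvAScan_foldl_shape A start maxlen v path visited (PySem.List.pyRange 0 n 1) (cycles, rest)
  have hC' : ((PySem.List.pyRange 0 n 1).foldl (pvAScan A start maxlen v path visited)
      (cycles, rest)).2 = C ++ rest := hC
  rw [hC']
  unfold pvMeasure
  rw [List.map_append, List.sum_append, List.map_cons, List.sum_cons]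
  have hmono : (C.map (pvWeight maxlen (n.toNat + 2))).sum
      < pvWeight maxlen (n.toNat + 2) (v, path, visited) := by
    rcases C with _ | ⟨e0, C'⟩
    · simp only [List.map_nil, List.sum_nil, pvWeight]
      exact Nat.pow_pos (by omega)
    · have hlt : (path.length : Int) < maxlen := (hCe e0 (by simp)).2
      set E : Nat := (maxlen + 1 - (path.length : Int)).toNat with hE
      have hE2 : 2 ≤ E := by omega
      have hp : 0 < (n.toNat + 2) ^ (E - 1) := Nat.pow_pos (by omega)
      have hsum : ((e0 :: C').map (pvWeight maxlen (n.toNat + 2))).sum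
          ≤ ((e0 :: C').map (pvWeight maxlen (n.toNat + 2))).length * (n.toNat + 2) ^ (E - 1) := by
        have := List.sum_le_card_nsmul ((e0 :: C').map (pvWeight maxlen (n.toNat + 2)))
          ((n.toNat + 2) ^ (E - 1)) ?_
        · simpa [smul_eq_mul] using this
        · intro x hx
          obtain ⟨e, he, rfl⟩ := List.mem_map.mp hx
          have hlen := (hCe e he).1
          unfold pvWeight
          have hexp : (maxlen + 1 - ((e.2.1.length : Int))).toNat = E - 1 := by
            rw [hlen]; push_cast; omega
          rw [hexp]
      have hlen2 : (e0 :: C').length ≤ n.toNat := by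
        calc (e0 :: C').length ≤ (PySem.List.pyRange 0 n 1).length := hC1
          _ = n.toNat := by rw [PySem.List.length_pyRange_one]; omega
      have hfin : (e0 :: C').length * (n.toNat + 2) ^ (E - 1) < (n.toNat + 2) ^ E := by
        have h1 : (e0 :: C').length * (n.toNat + 2) ^ (E - 1)
            < (n.toNat + 2) * (n.toNat + 2) ^ (E - 1) :=
          mul_lt_mul_of_pos_right (by omega) hp
        calc (e0 :: C').length * (n.toNat + 2) ^ (E - 1)
            < (n.toNat + 2) * (n.toNat + 2) ^ (E - 1) := h1
          _ = (n.toNat + 2) ^ (E - 1 + 1) := by ring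
          _ = (n.toNat + 2) ^ E := by congr 1; omega
      have hw : pvWeight maxlen (n.toNat + 2) (v, path, visited) = (n.toNat + 2) ^ E := by
        unfold pvWeight; rfl
      rw [hw]
      calc ((e0 :: C').map (pvWeight maxlen (n.toNat + 2))).sum
          ≤ ((e0 :: C').map (pvWeight maxlen (n.toNat + 2))).length * (n.toNat + 2) ^ (E - 1) :=
            hsum
        _ = (e0 :: C').length * (n.toNat + 2) ^ (E - 1) := by simp
        _ < (n.toNat + 2) ^ E := hfin
  omega

-- A's while-loop: pop the top entry, scan all w in range(n), recurse on the new stack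
def pvALoop (A : List (List Int)) (n start maxlen : Int) :
    List (Int × List Int × PySem.Set Int) → List (Int × List Int) → List (Int × List Int)
  | [], cycles => cycles
  | (v, path, visited) :: rest, cycles =>
    pvALoop A n start maxlen
      (((PySem.List.pyRange 0 n 1).foldl (pvAScan A start maxlen v path visited)
        (cycles, rest)).2)
      (((PySem.List.pyRange 0 n 1).foldl (pvAScan A start maxlen v path visited)
        (cycles, rest)).1)
termination_by stack _ => pvMeasure maxlen (n.toNat + 2) stack
decreasing_by exact pvALoop_dec A n start maxlen v path visited rest cycles

def find_all_directed_cycles (A : List (List Int)) (n : Int) (max_len : Option Int) :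
    List (Int × List Int) :=
  let maxlen : Int := match max_len with | none => n | some m => m
  (PySem.List.pyRange 0 n 1).foldl
    (fun cycles start =>
      pvALoop A n start maxlen [(start, [start], PySem.Set.ofList [start])] cycles) []

-- ===== PORT B =====
-- B's recursive DFS; pvDfsFold is B's 'for w in range(n-1, -1, -1)' loop
-- (h carries B's enclosing 'len(path) < limit' guard, needed only for termination)
mutual
def pvDfs (A : List (List Int)) (n start limit : Int) (v : Int) (path : List Int)
    (visited : PySem.Set Int) : List (Int × List Int) :=
  let own : List (Int × List Int) :=
    if ¬ PySem.List.pyGetD (PySem.List.pyGetD A v []) start 0 = 0 ∧ (3 : Int) ≤ path.length then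
      [((path.length : Int), PySem.Set.ofList path)]
    else []
  if h : (path.length : Int) < limit then
    pvDfsFold A n start limit path visited h (PySem.List.pyRange (n - 1) (-1) (-1)) v own
  else own
termination_by ((limit - path.length).toNat, 1, 0)
decreasing_by exact Prod.Lex.right _ (Prod.Lex.left _ _ (by omega))

def pvDfsFold (A : List (List Int)) (n start limit : Int) (path : List Int)
    (visited : PySem.Set Int) (h : (path.length : Int) < limit) :
    List Int → Int → List (Int × List Int) → List (Int × List Int)
  | [], _, acc => acc
  | w :: ws, v, acc =>
    pvDfsFold A n start limit path visited h ws v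
      (if ¬ PySem.List.pyGetD (PySem.List.pyGetD A v []) w 0 = 0 ∧ start < w ∧
          ¬ PySem.Set.contains visited w then
        acc ++ pvDfs A n start limit w (path ++ [w]) (PySem.Set.union visited [w])
      else acc)
termination_by ws _ _ => ((limit - path.length).toNat, 0, ws.length)
decreasing_by
  all_goals first
    | (apply Prod.Lex.right; apply Prod.Lex.right; simp only [List.length_cons]; omega)
    | (apply Prod.Lex.left
       have hlen : (path ++ [w]).length = path.length + 1 := by simp
       rw [hlen]; push_cast; omega)
end

def find_all_directed_cycles_alt (A : List (List Int)) (n : Int) (max_len : Option Int) :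
    List (Int × List Int) :=
  let limit : Int := match max_len with | none => n | some m => m
  (PySem.List.pyRange 0 n 1).foldl
    (fun cycles start =>
      cycles ++ pvDfs A n start limit start [start] (PySem.Set.ofList [start])) []

-- ===== PRECONDITION & SPEC =====
-- Pre_ excludes exactly the inputs on which A raises IndexError: the DFS reads A[v][w] for
-- 0 ≤ v, w < n, so the first n rows must exist and each have at least n entries.
def Pre_find_all_directed_cycles (A : List (List Int)) (n : Int) (max_len : Option Int) : Prop :=
  n ≤ (A.length : Int) ∧ ∀ row ∈ A.take n.toNat, n ≤ (row.length : Int)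
instance (A : List (List Int)) (n : Int) (max_len : Option Int) :
    Decidable (Pre_find_all_directed_cycles A n max_len) := by
  unfold Pre_find_all_directed_cycles; infer_instance

def pvWitness_find_all_directed_cycles : List (List Int) × Int × Option Int :=
  ([[0, 1, 0], [0, 0, 1], [1, 0, 0]], 3, none)

def Spec_find_all_directed_cycles (A : List (List Int)) (n : Int) (max_len : Option Int)
    (out : List (Int × List Int)) : Prop := out = find_all_directed_cycles_alt A n max_len
instance (A : List (List Int)) (n : Int) (max_len : Option Int) (out : List (Int × List Int)) :
    Decidable (Spec_find_all_directed_cycles A n max_len out) := by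
  unfold Spec_find_all_directed_cycles; infer_instance

-- ===== CLAIM (what is proved, stated in full; the proofs are below) =====
def Claim_equal_find_all_directed_cycles : Prop := ∀ (A : List (List Int)) (n : Int) (max_len : Option Int), Dom_find_all_directed_cycles A n max_len → Pre_find_all_directed_cycles A n max_len → Spec_find_all_directed_cycles A n max_len (find_all_directed_cycles A n max_len)

-- ===== LEMMAS AND PROOFS =====

-- the two (exclusive) productive outcomes of one scan step, as Bool predicates on w
def pvEmitP (A : List (List Int)) (start : Int) (v : Int) (path : List Int) (w : Int) : Bool :=
  !decide (PySem.List.pyGetD (PySem.List.pyGetD A v []) w 0 = 0) && decide (w = start) &&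
    decide ((3 : Int) ≤ path.length)

def pvChildP (A : List (List Int)) (start maxlen : Int) (v : Int) (path : List Int)
    (visited : PySem.Set Int) (w : Int) : Bool :=
  !decide (PySem.List.pyGetD (PySem.List.pyGetD A v []) w 0 = 0) && decide (start < w) &&
    !PySem.Set.contains visited w && decide ((path.length : Int) < maxlen)

def pvMk (path : List Int) (visited : PySem.Set Int) (w : Int) : Int × List Int × PySem.Set Int :=
  (w, path ++ [w], PySem.Set.union visited [w])

lemma pvAScan_foldl_eq (A : List (List Int)) (start maxlen : Int) (v : Int) (path : List Int)
    (visited : PySem.Set Int) :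
    ∀ (ws : List Int) (acc : List (Int × List Int) × List (Int × List Int × PySem.Set Int)),
    ws.foldl (pvAScan A start maxlen v path visited) acc
      = (acc.1 ++ (ws.filter (pvEmitP A start v path)).map
            (fun _ => ((path.length : Int), PySem.Set.ofList path)),
         ((ws.filter (pvChildP A start maxlen v path visited)).map (pvMk path visited)).reverse
           ++ acc.2) := by
  intro ws
  induction ws with
  | nil => intro acc; simp
  | cons w ws ih =>
    intro acc
    rw [List.foldl_cons, ih]
    have hstep : pvAScan A start maxlen v path visited acc w
        = (acc.1 ++ (if pvEmitP A start v path w then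
              [((path.length : Int), PySem.Set.ofList path)] else []),
           (if pvChildP A start maxlen v path visited w then [pvMk path visited w] else [])
             ++ acc.2) := by
      by_cases h1 : PySem.List.pyGetD (PySem.List.pyGetD A v []) w 0 = 0
      · have he : pvEmitP A start v path w = false := by simp [pvEmitP, h1]
        have hc : pvChildP A start maxlen v path visited w = false := by simp [pvChildP, h1]
        rw [pvAScan, if_pos h1, he, hc]
        simp
      · by_cases h2 : (w = start ∧ (3 : Int) ≤ path.length)
        · obtain ⟨hw, hl⟩ := id h2
          have h1' : ¬ PySem.List.pyGetD (PySem.List.pyGetD A v []) start 0 = 0 := hw ▸ h1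
          have he : pvEmitP A start v path w = true := by simp [pvEmitP, h1', hw, hl]
          have hc : pvChildP A start maxlen v path visited w = false := by
            simp [pvChildP, hw]
          rw [pvAScan, if_neg h1, if_pos h2, he, hc]
          simp
        · by_cases h3 : (start < w ∧ ¬ PySem.Set.contains visited w ∧
              (path.length : Int) < maxlen)
          · have he : pvEmitP A start v path w = false := by simp [pvEmitP, h3.1.ne']
            have hnv : w ∉ visited := by simpa using h3.2.1
            have hc : pvChildP A start maxlen v path visited w = true := by
              simp [pvChildP, h1, h3.1, hnv, h3.2.2]
            rw [pvAScan, if_neg h1, if_neg h2, if_pos h3, he, hc]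
            simp [pvMk]
          · have he : pvEmitP A start v path w = false := by
              rcases not_and_or.mp h2 with hw | hl
              · simp [pvEmitP, hw]
              · simp [pvEmitP, hl]
            have hc : pvChildP A start maxlen v path visited w = false := by
              by_cases hsw : start < w
              · by_cases hv : PySem.Set.contains visited w = true
                · have hv' : w ∈ visited := by simpa using hv
                  simp [pvChildP, hv']
                · have hml : ¬ ((path.length : Int) < maxlen) :=
                    fun hml => h3 ⟨hsw, hv, hml⟩
                  simp [pvChildP, hml]
              · simp [pvChildP, hsw]
            rw [pvAScan, if_neg h1, if_neg h2, if_neg h3, he, hc]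
            simp
    rw [hstep]
    by_cases he : pvEmitP A start v path w = true <;>
      by_cases hc : pvChildP A start maxlen v path visited w = true <;>
        simp [List.filter_cons, he, hc, List.append_assoc]
  
-- unfolding equations for the mutual pair
lemma pvDfsFold_nil (A : List (List Int)) (n start limit : Int) (path : List Int)
    (visited : PySem.Set Int) (h : (path.length : Int) < limit) (v : Int)
    (acc : List (Int × List Int)) :
    pvDfsFold A n start limit path visited h [] v acc = acc := by
  conv_lhs => unfold pvDfsFold

lemma pvDfsFold_cons (A : List (List Int)) (n start limit : Int) (path : List Int)
    (visited : PySem.Set Int) (h : (path.length : Int) < limit) (w : Int) (ws : List Int)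
    (v : Int) (acc : List (Int × List Int)) :
    pvDfsFold A n start limit path visited h (w :: ws) v acc
      = pvDfsFold A n start limit path visited h ws v
          (if ¬ PySem.List.pyGetD (PySem.List.pyGetD A v []) w 0 = 0 ∧ start < w ∧
              ¬ PySem.Set.contains visited w then
            acc ++ pvDfs A n start limit w (path ++ [w]) (PySem.Set.union visited [w])
          else acc) := by
  conv_lhs => unfold pvDfsFold

-- B's inner loop is acc ++ flatMap of the recursive calls over the filtered range
lemma pvDfsFold_eq (A : List (List Int)) (n start limit : Int) (path : List Int)
    (visited : PySem.Set Int) (h : (path.length : Int) < limit) (v : Int) :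
    ∀ (ws : List Int) (acc : List (Int × List Int)),
    pvDfsFold A n start limit path visited h ws v acc
      = acc ++ (ws.filter (pvChildP A start limit v path visited)).flatMap
          (fun w => pvDfs A n start limit w (path ++ [w]) (PySem.Set.union visited [w])) := by
  intro ws
  induction ws with
  | nil => intro acc; rw [pvDfsFold_nil]; simp
  | cons w ws ih =>
    intro acc
    rw [pvDfsFold_cons, ih]
    have hiff : pvChildP A start limit v path visited w = true ↔
        (¬ PySem.List.pyGetD (PySem.List.pyGetD A v []) w 0 = 0 ∧ start < w ∧
          ¬ PySem.Set.contains visited w) := by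
      simp [pvChildP, h, and_assoc]
    by_cases hc : (¬ PySem.List.pyGetD (PySem.List.pyGetD A v []) w 0 = 0 ∧ start < w ∧
        ¬ PySem.Set.contains visited w)
    · rw [if_pos hc, List.filter_cons_of_pos (hiff.mpr hc), List.flatMap_cons,
        List.append_assoc]
    · rw [if_neg hc, List.filter_cons_of_neg (fun ht => hc (hiff.mp ht))]

-- one dfs call = its own cycle (if any) ++ the recursive calls on the filtered children
lemma pvDfs_unfold (A : List (List Int)) (n start limit : Int) (v : Int) (path : List Int)
    (visited : PySem.Set Int) :
    pvDfs A n start limit v path visited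
      = (if ¬ PySem.List.pyGetD (PySem.List.pyGetD A v []) start 0 = 0 ∧
            (3 : Int) ≤ path.length then
          [((path.length : Int), PySem.Set.ofList path)] else [])
        ++ ((PySem.List.pyRange 0 n 1).filter
              (pvChildP A start limit v path visited)).reverse.flatMap
            (fun w => pvDfs A n start limit w (path ++ [w]) (PySem.Set.union visited [w])) := by
  rw [pvDfs]
  by_cases h : (path.length : Int) < limit
  · rw [dif_pos h, pvDfsFold_eq A n start limit path visited h v]
    have hrev : PySem.List.pyRange (n - 1) (-1) (-1) = (PySem.List.pyRange 0 n 1).reverse := by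
      have := PySem.List.pyRange_neg_one_eq_reverse (n - 1) (-1)
      simpa using this
    rw [hrev, List.filter_reverse]
  · rw [dif_neg h]
    have hnil : (PySem.List.pyRange 0 n 1).filter (pvChildP A start limit v path visited)
        = [] := by
      apply List.filter_eq_nil_iff.mpr
      intro w _
      simp [pvChildP, h]
    simp [hnil]

-- flatMap over the reversed mapped children = flatMap of the dfs calls
lemma pvRevMap (A : List (List Int)) (n start maxlen : Int) (v : Int) (path : List Int)
    (visited : PySem.Set Int) (l : List Int) :
    ((l.map (pvMk path visited)).reverse.flatMap
        (fun e => pvDfs A n start maxlen e.1 e.2.1 e.2.2))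
      = l.reverse.flatMap
          (fun w => pvDfs A n start maxlen w (path ++ [w]) (PySem.Set.union visited [w])) := by
  rw [← List.map_reverse, List.flatMap_map]
  rfl

-- main invariant: A's while-loop equals the flatMap of B's dfs over the stack entries
lemma pvALoop_eq_dfs (A : List (List Int)) (n start maxlen : Int)
    (hs0 : 0 ≤ start) (hsn : start < n) :
    ∀ (N : Nat) (stack : List (Int × List Int × PySem.Set Int)) (cycles : List (Int × List Int)),
    pvMeasure maxlen (n.toNat + 2) stack ≤ N →
    pvALoop A n start maxlen stack cycles
      = cycles ++ stack.flatMap (fun e => pvDfs A n start maxlen e.1 e.2.1 e.2.2) := by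
  intro N
  induction N with
  | zero =>
    intro stack cycles hm
    rcases stack with _ | ⟨⟨v, path, visited⟩, rest⟩
    · simp [pvALoop]
    · exfalso
      have hpos : 0 < pvWeight maxlen (n.toNat + 2) (v, path, visited) := by
        unfold pvWeight; exact Nat.pow_pos (by omega)
      unfold pvMeasure at hm
      simp only [List.map_cons, List.sum_cons] at hm
      omega
  | succ N ih =>
    intro stack cycles hm
    rcases stack with _ | ⟨⟨v, path, visited⟩, rest⟩
    · simp [pvALoop]
    · simp only [pvALoop]
      have hdec := pvALoop_dec A n start maxlen v path visited rest cycles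
      rw [ih (((PySem.List.pyRange 0 n 1).foldl (pvAScan A start maxlen v path visited)
            (cycles, rest)).2)
          (((PySem.List.pyRange 0 n 1).foldl (pvAScan A start maxlen v path visited)
            (cycles, rest)).1)
          (by omega)]
      rw [pvAScan_foldl_eq]
      -- the emitted-cycles part of the scan: at most the one back-edge to start
      have hemit : (PySem.List.pyRange 0 n 1).filter (pvEmitP A start v path)
          = if ¬ PySem.List.pyGetD (PySem.List.pyGetD A v []) start 0 = 0 ∧
                (3 : Int) ≤ path.length then [start] else [] := by
        have hcongr : (PySem.List.pyRange 0 n 1).filter (pvEmitP A start v path)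
            = (PySem.List.pyRange 0 n 1).filter
                (fun w => decide (w = start) &&
                  (!decide (PySem.List.pyGetD (PySem.List.pyGetD A v []) start 0 = 0) &&
                    decide ((3 : Int) ≤ path.length))) := by
          apply List.filter_congr
          intro w _
          unfold pvEmitP
          by_cases hw : w = start
          · subst hw; simp [Bool.and_comm]
          · simp [hw]
        rw [hcongr]
        by_cases hR : (¬ PySem.List.pyGetD (PySem.List.pyGetD A v []) start 0 = 0 ∧
            (3 : Int) ≤ path.length)
        · rw [if_pos hR]
          have hsimp : (PySem.List.pyRange 0 n 1).filter
              (fun w => decide (w = start) &&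
                (!decide (PySem.List.pyGetD (PySem.List.pyGetD A v []) start 0 = 0) &&
                  decide ((3 : Int) ≤ path.length)))
              = (PySem.List.pyRange 0 n 1).filter (fun w => decide (w = start)) := by
            apply List.filter_congr
            intro w _
            rcases hR with ⟨hR1, hR2⟩
            simp [hR1, hR2]
          rw [hsimp]
          have hmem : start ∈ PySem.List.pyRange 0 n 1 := by
            rw [PySem.List.mem_pyRange_one]; omega
          have hnd := PySem.List.nodup_pyRange_one 0 n
          have hcnt : List.count start (PySem.List.pyRange 0 n 1) = 1 :=
            List.count_eq_one_of_mem hnd hmem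
          rw [List.filter_eq start, hcnt]
          simp
        · rw [if_neg hR]
          apply List.filter_eq_nil_iff.mpr
          intro w _
          by_cases h0 : PySem.List.pyGetD (PySem.List.pyGetD A v []) start 0 = 0
          · simp [h0]
          · have h3 : ¬ ((3 : Int) ≤ (path.length : Int)) := fun h3 => hR ⟨h0, h3⟩
            simp [h3]
      rw [hemit,
        apply_ite (List.map (fun _ => ((path.length : Int), PySem.Set.ofList path)))]
      simp only [List.map_cons, List.map_nil, List.flatMap_cons, List.flatMap_append,
        List.append_assoc]
      rw [pvRevMap, pvDfs_unfold A n start maxlen v path visited]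
      simp [List.append_assoc]
      all_goals exact (0 : Int)  -- discharges an unconstrained unification metavariable

-- ===== VERDICT (by name: the statement is the Claim_ definition above) =====
theorem find_all_directed_cycles_spec : Claim_equal_find_all_directed_cycles := by
  intro A n max_len _hDom _hPre
  unfold Spec_find_all_directed_cycles
  unfold find_all_directed_cycles find_all_directed_cycles_alt
  dsimp only
  apply PySem.List.foldl_congr_mem
  intro cycles start hmem
  have hs := (PySem.List.mem_pyRange_one).mp hmem
  rw [pvALoop_eq_dfs A n start _ hs.1 hs.2
    (pvMeasure _ (n.toNat + 2) [(start, [start], PySem.Set.ofList [start])]) _ cycles le_rfl]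
  simp
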